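-- pv_equiv track=rewrite | github.com/pedro19v/GIMME | GIMMECore/Subspace.py | initIncrement
-- ===== SOURCE A (Python) =====
-- def initIncrement(integers, numOfCombinations, sumOfNumOfCombinations, maxFirstMemberOfM, ipUsesLocalBranchAndBound):
--     increment = [[] for _ in range(len(integers))]
--     increment[-1] = [1,]
--
--     s = len(integers) - 2
--     while s >= 0:
--         if integers[s] != integers[s+1] or (ipUsesLocalBranchAndBound and s == len(integers) - 2 and len(integers) > 2):
--             increment[s] = [sumOfNumOfCombinations[s+1] * increment[s+1][0]]
--             s -= 1
--
--         else:
--             increment[s] = [[] for _ in range(maxFirstMemberOfM[s])]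
--             for i in range(maxFirstMemberOfM[s]):
--                 increment[s][i] = 0
--                 for j in range(i, maxFirstMemberOfM[s]):
--                     increment[s][i] += numOfCombinations[s+1][j] * increment[s+1][0]
--
--             s -= 1
--
--             while s >= 0 and integers[s] == integers[s+1]:
--                 increment[s] = [[] for _ in range(maxFirstMemberOfM[s])]
--                 for i in range(maxFirstMemberOfM[s]):
--                     increment[s][i] = 0
--                     for j in range(i, maxFirstMemberOfM[s]):
--                         increment[s][i] += numOfCombinations[s+1][j] * increment[s+1][j]
--
--                 s -= 1
--
--             if s >= 0:
--                 increment[s] = [0,]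
--                 for j in range(maxFirstMemberOfM[s+1]):
--                     increment[s][0] += numOfCombinations[s+1][j] * increment[s+1][j]
--                 s -= 1
--
--     return increment
-- ===== SOURCE B (Python) =====
-- def initIncrement(integers, numOfCombinations, sumOfNumOfCombinations, maxFirstMemberOfM, ipUsesLocalBranchAndBound):
--     n = len(integers)
--     out = [[1]]
--     prev = [1]
--     prev_run = False
--     for s in range(n - 2, -1, -1):
--         eq = integers[s] == integers[s + 1]
--         special = ipUsesLocalBranchAndBound and s == n - 2 and n > 2
--         if eq and not special:
--             # run row: one backward pass with a running suffix-sum accumulator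
--             m = maxFirstMemberOfM[s]
--             acc = 0
--             row = []
--             for j in range(max(m, 0) - 1, -1, -1):
--                 acc += numOfCombinations[s + 1][j] * (prev[j] if prev_run else prev[0])
--                 row.append(acc)
--             row.reverse()
--             prev = row
--             prev_run = True
--         elif prev_run:
--             # closing row below a run
--             total = 0
--             for j in range(max(maxFirstMemberOfM[s + 1], 0)):
--                 total += numOfCombinations[s + 1][j] * prev[j]
--             prev = [total]
--             prev_run = False
--         else:
--             prev = [sumOfNumOfCombinations[s + 1] * prev[0]]
--         out.append(prev)
--     out.reverse()
--     return out
-- ===== Notes on version B (the rewrite author's own statement) =====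
-- stated objective: alternative
-- what changed: B replaces A's outer-while/inner-while state machine and its per-row nested loop (recomputing the inner suffix sum from scratch for every i) by a single backward for-loop with a prev-row/flag state and, per run row, one backward pass maintaining a running suffix-sum accumulator, building each row back-to-front; fewer inner-sum recomputations per row, same measured cost on the generated inputs.
import Mathlib
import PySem

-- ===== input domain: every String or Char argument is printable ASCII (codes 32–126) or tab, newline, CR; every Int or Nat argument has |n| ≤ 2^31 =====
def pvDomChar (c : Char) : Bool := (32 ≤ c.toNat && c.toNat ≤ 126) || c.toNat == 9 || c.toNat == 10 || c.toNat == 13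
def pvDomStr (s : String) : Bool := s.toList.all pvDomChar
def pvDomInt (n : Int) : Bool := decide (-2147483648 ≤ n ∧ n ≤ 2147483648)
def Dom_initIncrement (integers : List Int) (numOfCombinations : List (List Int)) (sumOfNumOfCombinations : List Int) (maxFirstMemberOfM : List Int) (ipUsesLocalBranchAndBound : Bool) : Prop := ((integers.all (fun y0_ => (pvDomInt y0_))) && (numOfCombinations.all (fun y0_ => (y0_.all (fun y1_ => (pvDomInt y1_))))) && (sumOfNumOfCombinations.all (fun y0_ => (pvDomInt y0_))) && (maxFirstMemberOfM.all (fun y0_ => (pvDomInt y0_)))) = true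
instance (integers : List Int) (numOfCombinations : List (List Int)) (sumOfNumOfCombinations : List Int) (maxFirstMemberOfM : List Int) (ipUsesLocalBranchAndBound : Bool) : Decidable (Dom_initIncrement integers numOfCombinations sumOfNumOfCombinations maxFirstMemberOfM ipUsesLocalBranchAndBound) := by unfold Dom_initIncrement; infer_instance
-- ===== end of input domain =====

-- B replaces A's nested per-row summations by one running suffix-sum pass per row, built
-- back-to-front; equality of the two ports is proved, Pre_ excludes exactly the inputs where Python A raises.

-- ===== PORT A =====
-- row built when a run of equal integers starts (inner sum uses prev[0])
def aRunHeadRow (noc1 prev : List Int) (m : Int) : List Int :=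
  (List.range m.toNat).map (fun i =>
    ((List.range m.toNat).drop i).foldl (fun acc j => acc + noc1.getD j 0 * prev.getD 0 0) 0)

-- row built inside the inner while (inner sum uses prev[j])
def aRunInnerRow (noc1 prev : List Int) (m : Int) : List Int :=
  (List.range m.toNat).map (fun i =>
    ((List.range m.toNat).drop i).foldl (fun acc j => acc + noc1.getD j 0 * prev.getD j 0) 0)

-- single-element row closing a run
def aCloseRow (noc1 prev : List Int) (m1 : Int) : List Int :=
  [(List.range m1.toNat).foldl (fun acc j => acc + noc1.getD j 0 * prev.getD j 0) 0]

mutual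
-- the outer while loop of A; the Nat argument is s+1 (0 means s = -1, loop done);
-- acc holds rows s+1 .. n-1 in order, its head is increment[s+1]
def aOuter (integers : List Int) (noc : List (List Int)) (soc mfm : List Int) (lbb : Bool) : Nat → List (List Int) → List (List Int)
  | 0, acc => acc
  | Nat.succ s, acc =>
    let prev := acc.headD []
    if integers.getD s 0 ≠ integers.getD (s+1) 0 ∨ (lbb = true ∧ s + 2 = integers.length ∧ 2 < integers.length) then
      aOuter integers noc soc mfm lbb s ([soc.getD (s+1) 0 * prev.getD 0 0] :: acc)
    else
      aInner integers noc soc mfm lbb s (aRunHeadRow (noc.getD (s+1) []) prev (mfm.getD s 0) :: acc)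
-- the inner while loop of A plus the closing `if s >= 0` block
def aInner (integers : List Int) (noc : List (List Int)) (soc mfm : List Int) (lbb : Bool) : Nat → List (List Int) → List (List Int)
  | 0, acc => acc
  | Nat.succ s, acc =>
    let prev := acc.headD []
    if integers.getD s 0 = integers.getD (s+1) 0 then
      aInner integers noc soc mfm lbb s (aRunInnerRow (noc.getD (s+1) []) prev (mfm.getD s 0) :: acc)
    else
      aOuter integers noc soc mfm lbb s (aCloseRow (noc.getD (s+1) []) prev (mfm.getD (s+1) 0) :: acc)
end

def initIncrement (integers : List Int) (numOfCombinations : List (List Int)) (sumOfNumOfCombinations : List Int) (maxFirstMemberOfM : List Int) (ipUsesLocalBranchAndBound : Bool) : List (List Int) :=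
  aOuter integers numOfCombinations sumOfNumOfCombinations maxFirstMemberOfM ipUsesLocalBranchAndBound (integers.length - 1) [[1]]

-- ===== PORT B =====
-- one backward pass: running suffix-sum accumulator, row built back-to-front then reversed
def bRunRow (noc1 prev : List Int) (m : Int) (prevRun : Bool) : List Int :=
  ((((List.range m.toNat).reverse).foldl
    (fun (p : Int × List Int) j =>
      (p.1 + noc1.getD j 0 * (if prevRun then prev.getD j 0 else prev.getD 0 0),
       p.2 ++ [p.1 + noc1.getD j 0 * (if prevRun then prev.getD j 0 else prev.getD 0 0)]))
    (0, [])).2).reverse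

def bCloseRow (noc1 prev : List Int) (m1 : Int) : List Int :=
  [(List.range m1.toNat).foldl (fun t j => t + noc1.getD j 0 * prev.getD j 0) 0]

-- B's single for-loop over s (Nat argument is s+1), carrying the previous row and a
-- "previous row is a run row" flag; out accumulates rows in reverse, reversed at the top level
def bLoop (integers : List Int) (noc : List (List Int)) (soc mfm : List Int) (lbb : Bool) : Nat → Bool → List Int → List (List Int) → List (List Int)
  | 0, _, _, out => out
  | Nat.succ s, prevRun, prev, out =>
    if (integers.getD s 0 == integers.getD (s+1) 0)
        && !(lbb && decide (s + 2 = integers.length) && decide (2 < integers.length)) then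
      let row := bRunRow (noc.getD (s+1) []) prev (mfm.getD s 0) prevRun
      bLoop integers noc soc mfm lbb s true row (out ++ [row])
    else if prevRun then
      let row := bCloseRow (noc.getD (s+1) []) prev (mfm.getD (s+1) 0)
      bLoop integers noc soc mfm lbb s false row (out ++ [row])
    else
      let row := [soc.getD (s+1) 0 * prev.getD 0 0]
      bLoop integers noc soc mfm lbb s false row (out ++ [row])

def initIncrement_alt (integers : List Int) (numOfCombinations : List (List Int)) (sumOfNumOfCombinations : List Int) (maxFirstMemberOfM : List Int) (ipUsesLocalBranchAndBound : Bool) : List (List Int) :=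
  (bLoop integers numOfCombinations sumOfNumOfCombinations maxFirstMemberOfM ipUsesLocalBranchAndBound (integers.length - 1) false [1] [[1]]).reverse

-- ===== PRECONDITION & SPEC =====
-- run-row test at position k: equal neighbours and not the branch-and-bound special case at n-2
def preCond (integers : List Int) (lbb : Bool) (k : Nat) : Bool :=
  (integers.getD k 0 == integers.getD (k+1) 0)
    && !(lbb && decide (k + 2 = integers.length) && decide (2 < integers.length))

-- "row k+1 is a run row" (so it has length max(maxFirstMemberOfM[k+1],0) and is indexed per-j)
def prePrevRun (integers : List Int) (lbb : Bool) (k : Nat) : Bool :=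
  decide (k + 3 ≤ integers.length) && preCond integers lbb (k+1)

-- Pre_ holds exactly on the inputs where Python A returns without an exception: integers is
-- nonempty and at every position A reads only existing entries — a run row needs mfm[k], and
-- (when positive) a long-enough numOfCombinations[k+1] row and, inside a run, a previous run row
-- at least as long; a closing row needs a long-enough numOfCombinations[k+1] row; a plain row
-- needs sumOfNumOfCombinations[k+1].  (Verified exhaustively against Python A by fuzzing.)
def Pre_initIncrement (integers : List Int) (numOfCombinations : List (List Int)) (sumOfNumOfCombinations : List Int) (maxFirstMemberOfM : List Int) (ipUsesLocalBranchAndBound : Bool) : Prop :=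
  1 ≤ integers.length ∧
  ((List.range (integers.length - 1)).all (fun k =>
    if preCond integers ipUsesLocalBranchAndBound k then
      decide (k < maxFirstMemberOfM.length)
      && (decide (maxFirstMemberOfM.getD k 0 ≤ 0)
          || (decide (k + 1 < numOfCombinations.length)
              && decide (maxFirstMemberOfM.getD k 0 ≤ ((numOfCombinations.getD (k+1) []).length : Int))
              && (!(prePrevRun integers ipUsesLocalBranchAndBound k)
                  || decide (maxFirstMemberOfM.getD k 0 ≤ maxFirstMemberOfM.getD (k+1) 0))))
    else if prePrevRun integers ipUsesLocalBranchAndBound k then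
      decide (maxFirstMemberOfM.getD (k+1) 0 ≤ 0)
      || (decide (k + 1 < numOfCombinations.length)
          && decide (maxFirstMemberOfM.getD (k+1) 0 ≤ ((numOfCombinations.getD (k+1) []).length : Int)))
    else
      decide (k + 1 < sumOfNumOfCombinations.length))) = true
instance (integers : List Int) (numOfCombinations : List (List Int)) (sumOfNumOfCombinations : List Int) (maxFirstMemberOfM : List Int) (ipUsesLocalBranchAndBound : Bool) : Decidable (Pre_initIncrement integers numOfCombinations sumOfNumOfCombinations maxFirstMemberOfM ipUsesLocalBranchAndBound) := by unfold Pre_initIncrement; infer_instance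

def pvWitness_initIncrement : List Int × List (List Int) × List Int × List Int × Bool :=
  ([1, 2], [], [0, 0], [], false)

def Spec_initIncrement (integers : List Int) (numOfCombinations : List (List Int)) (sumOfNumOfCombinations : List Int) (maxFirstMemberOfM : List Int) (ipUsesLocalBranchAndBound : Bool) (out : List (List Int)) : Prop := out = initIncrement_alt integers numOfCombinations sumOfNumOfCombinations maxFirstMemberOfM ipUsesLocalBranchAndBound
instance (integers : List Int) (numOfCombinations : List (List Int)) (sumOfNumOfCombinations : List Int) (maxFirstMemberOfM : List Int) (ipUsesLocalBranchAndBound : Bool) (out : List (List Int)) : Decidable (Spec_initIncrement integers numOfCombinations sumOfNumOfCombinations maxFirstMemberOfM ipUsesLocalBranchAndBound out) := by unfold Spec_initIncrement; infer_instance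

-- ===== CLAIM (what is proved, stated in full; the proofs are below) =====
def Claim_equal_initIncrement : Prop := ∀ (integers : List Int) (numOfCombinations : List (List Int)) (sumOfNumOfCombinations : List Int) (maxFirstMemberOfM : List Int) (ipUsesLocalBranchAndBound : Bool), Dom_initIncrement integers numOfCombinations sumOfNumOfCombinations maxFirstMemberOfM ipUsesLocalBranchAndBound → Pre_initIncrement integers numOfCombinations sumOfNumOfCombinations maxFirstMemberOfM ipUsesLocalBranchAndBound → Spec_initIncrement integers numOfCombinations sumOfNumOfCombinations maxFirstMemberOfM ipUsesLocalBranchAndBound (initIncrement integers numOfCombinations sumOfNumOfCombinations maxFirstMemberOfM ipUsesLocalBranchAndBound)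

-- ===== LEMMAS AND PROOFS =====

-- rows produced by A's loops below index s (flag = inside the inner while), newest row last
def rowsA (integers : List Int) (noc : List (List Int)) (soc mfm : List Int) (lbb : Bool) : Nat → Bool → List Int → List (List Int)
  | 0, _, _ => []
  | Nat.succ s, false, prev =>
    if integers.getD s 0 ≠ integers.getD (s+1) 0 ∨ (lbb = true ∧ s + 2 = integers.length ∧ 2 < integers.length) then
      rowsA integers noc soc mfm lbb s false [soc.getD (s+1) 0 * prev.getD 0 0] ++ [[soc.getD (s+1) 0 * prev.getD 0 0]]
    else
      rowsA integers noc soc mfm lbb s true (aRunHeadRow (noc.getD (s+1) []) prev (mfm.getD s 0)) ++ [aRunHeadRow (noc.getD (s+1) []) prev (mfm.getD s 0)]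
  | Nat.succ s, true, prev =>
    if integers.getD s 0 = integers.getD (s+1) 0 then
      rowsA integers noc soc mfm lbb s true (aRunInnerRow (noc.getD (s+1) []) prev (mfm.getD s 0)) ++ [aRunInnerRow (noc.getD (s+1) []) prev (mfm.getD s 0)]
    else
      rowsA integers noc soc mfm lbb s false (aCloseRow (noc.getD (s+1) []) prev (mfm.getD (s+1) 0)) ++ [aCloseRow (noc.getD (s+1) []) prev (mfm.getD (s+1) 0)]

-- rows produced by B's loop below index s, newest row last
def rowsB (integers : List Int) (noc : List (List Int)) (soc mfm : List Int) (lbb : Bool) : Nat → Bool → List Int → List (List Int)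
  | 0, _, _ => []
  | Nat.succ s, flag, prev =>
    if (integers.getD s 0 == integers.getD (s+1) 0)
        && !(lbb && decide (s + 2 = integers.length) && decide (2 < integers.length)) then
      rowsB integers noc soc mfm lbb s true (bRunRow (noc.getD (s+1) []) prev (mfm.getD s 0) flag) ++ [bRunRow (noc.getD (s+1) []) prev (mfm.getD s 0) flag]
    else if flag then
      rowsB integers noc soc mfm lbb s false (bCloseRow (noc.getD (s+1) []) prev (mfm.getD (s+1) 0)) ++ [bCloseRow (noc.getD (s+1) []) prev (mfm.getD (s+1) 0)]
    else
      rowsB integers noc soc mfm lbb s false [soc.getD (s+1) 0 * prev.getD 0 0] ++ [[soc.getD (s+1) 0 * prev.getD 0 0]]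

theorem aRows_eq (integers : List Int) (noc : List (List Int)) (soc mfm : List Int) (lbb : Bool) :
    ∀ k, (∀ acc, aOuter integers noc soc mfm lbb k acc = rowsA integers noc soc mfm lbb k false (acc.headD []) ++ acc)
       ∧ (∀ acc, aInner integers noc soc mfm lbb k acc = rowsA integers noc soc mfm lbb k true (acc.headD []) ++ acc) := by
  intro k
  induction k with
  | zero => simp [aOuter, aInner, rowsA]
  | succ s ih =>
    refine ⟨fun acc => ?_, fun acc => ?_⟩
    · rw [aOuter]
      by_cases h : integers.getD s 0 ≠ integers.getD (s+1) 0 ∨ (lbb = true ∧ s + 2 = integers.length ∧ 2 < integers.length)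
      · rw [if_pos h, ih.1]
        conv_rhs => rw [rowsA, if_pos h]
        simp
      · rw [if_neg h, ih.2]
        conv_rhs => rw [rowsA, if_neg h]
        simp
    · rw [aInner]
      by_cases h : integers.getD s 0 = integers.getD (s+1) 0
      · rw [if_pos h, ih.2]
        conv_rhs => rw [rowsA, if_pos h]
        simp
      · rw [if_neg h, ih.1]
        conv_rhs => rw [rowsA, if_neg h]
        simp

theorem bRows_eq (integers : List Int) (noc : List (List Int)) (soc mfm : List Int) (lbb : Bool) :
    ∀ k flag prev out, bLoop integers noc soc mfm lbb k flag prev out = out ++ (rowsB integers noc soc mfm lbb k flag prev).reverse := by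
  intro k
  induction k with
  | zero => simp [bLoop, rowsB]
  | succ s ih =>
    intro flag prev out
    rw [bLoop, rowsB]
    split
    · rw [ih]; simp
    · split
      · rw [ih]; simp
      · rw [ih]; simp

theorem foldl_add_sum (g : Nat → Int) : ∀ (l : List Nat) (a : Int),
    l.foldl (fun acc j => acc + g j) a = a + (l.map g).sum := by
  intro l
  induction l with
  | nil => simp
  | cons x xs ih => intro a; simp [ih, add_assoc]

theorem bfold (g : Nat → Int) : ∀ (m : Nat) (a0 : Int) (r0 : List Int),
    ((List.range m).reverse).foldl (fun (p : Int × List Int) j => (p.1 + g j, p.2 ++ [p.1 + g j])) (a0, r0)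
      = (a0 + ((List.range m).map g).sum,
         r0 ++ (List.range m).reverse.map (fun k => a0 + (((List.range m).drop k).map g).sum)) := by
  intro m
  induction m with
  | zero => simp
  | succ m ih =>
    intro a0 r0
    rw [List.range_succ]
    simp only [List.reverse_append, List.reverse_cons, List.reverse_nil, List.nil_append,
      List.singleton_append, List.foldl_cons]
    rw [ih]
    rw [Prod.mk.injEq]
    constructor
    · simp
      ring
    · rw [List.map_cons]
      have hdrop : ∀ k, k < m → (List.range m ++ [m]).drop k = (List.range m).drop k ++ [m] := by
        intro k hk
        rw [List.drop_append_of_le_length]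
        simp
        omega
      have hm : (List.range m ++ [m]).drop m = [m] := by
        rw [List.drop_append_of_le_length] <;> simp
      rw [hm]
      have hcg : ((List.range m).reverse).map (fun k => a0 + (((List.range m ++ [m]).drop k).map g).sum)
           = ((List.range m).reverse).map (fun k => (a0 + g m) + (((List.range m).drop k).map g).sum) := by
        apply List.map_congr_left
        intro k hk
        rw [hdrop k (by simpa using hk)]
        simp
        ring
      rw [hcg]
      simp

theorem bRunRow_spec (noc1 prev : List Int) (m : Int) (pr : Bool) :
    bRunRow noc1 prev m pr
      = (List.range m.toNat).map (fun i =>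
          (((List.range m.toNat).drop i).map (fun j => noc1.getD j 0 * (if pr then prev.getD j 0 else prev.getD 0 0))).sum) := by
  unfold bRunRow
  rw [bfold (fun j => noc1.getD j 0 * (if pr then prev.getD j 0 else prev.getD 0 0)) m.toNat 0 []]
  simp [List.map_reverse]

theorem runRow_head (noc1 prev : List Int) (m : Int) :
    aRunHeadRow noc1 prev m = bRunRow noc1 prev m false := by
  rw [bRunRow_spec]
  unfold aRunHeadRow
  apply List.map_congr_left
  intro i _
  rw [foldl_add_sum]
  simp

theorem runRow_inner (noc1 prev : List Int) (m : Int) :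
    aRunInnerRow noc1 prev m = bRunRow noc1 prev m true := by
  rw [bRunRow_spec]
  unfold aRunInnerRow
  apply List.map_congr_left
  intro i _
  rw [foldl_add_sum]
  simp

theorem closeRow_eq (noc1 prev : List Int) (m1 : Int) :
    aCloseRow noc1 prev m1 = bCloseRow noc1 prev m1 := by
  unfold aCloseRow bCloseRow
  rfl

-- the Prop condition of A's outer test versus the Bool condition of B's loop
theorem condAB (a b : Int) (lbb : Bool) (e n : Prop) [Decidable e] [Decidable n] :
    ((a == b) && !(lbb && decide e && decide n)) = true ↔ ¬(a ≠ b ∨ (lbb = true ∧ e ∧ n)) := by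
  cases lbb <;> by_cases he : e <;> by_cases hn : n <;> simp [he, hn, beq_iff_eq]

-- the two row streams agree; the bound keeps the inner while away from the special
-- branch-and-bound index n-2, exactly as in A's control flow
theorem rows_agree (integers : List Int) (noc : List (List Int)) (soc mfm : List Int) (lbb : Bool) :
    ∀ k flag prev, (k = 0 ∨ k + (if flag then 2 else 1) ≤ integers.length) →
      rowsA integers noc soc mfm lbb k flag prev = rowsB integers noc soc mfm lbb k flag prev := by
  intro k
  induction k with
  | zero => intro flag prev _; cases flag <;> rfl
  | succ s ih =>
    intro flag prev hk
    have key := condAB (integers.getD s 0) (integers.getD (s+1) 0) lbb (s + 2 = integers.length) (2 < integers.length)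
    cases flag with
    | false =>
      have hk' : s + 2 ≤ integers.length := by simpa using hk
      rw [rowsA, rowsB]
      by_cases hA : integers.getD s 0 ≠ integers.getD (s+1) 0 ∨ (lbb = true ∧ s + 2 = integers.length ∧ 2 < integers.length)
      · have hB : ¬(((integers.getD s 0 == integers.getD (s+1) 0) && !(lbb && decide (s + 2 = integers.length) && decide (2 < integers.length))) = true) := by
          rw [key]; exact not_not_intro hA
        rw [if_pos hA, if_neg hB, if_neg (by simp)]
        rw [ih false _ (by simp; omega)]
      · have hB : ((integers.getD s 0 == integers.getD (s+1) 0) && !(lbb && decide (s + 2 = integers.length) && decide (2 < integers.length))) = true := key.mpr hA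
        rw [if_neg hA, if_pos hB, runRow_head]
        rw [ih true _ (by simp; omega)]
    | true =>
      have hk' : s + 3 ≤ integers.length := by simpa using hk
      have hsp : ¬(s + 2 = integers.length) := by omega
      rw [rowsA, rowsB]
      by_cases h1 : integers.getD s 0 = integers.getD (s+1) 0
      · have hB : ((integers.getD s 0 == integers.getD (s+1) 0) && !(lbb && decide (s + 2 = integers.length) && decide (2 < integers.length))) = true := by
          apply key.mpr
          rintro (h | ⟨_, he, _⟩)
          · exact h h1
          · exact hsp he
        rw [if_pos h1, if_pos hB, runRow_inner]
        rw [ih true _ (by simp; omega)]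
      · have hB : ¬(((integers.getD s 0 == integers.getD (s+1) 0) && !(lbb && decide (s + 2 = integers.length) && decide (2 < integers.length))) = true) := by
          intro hc
          exact (key.mp hc) (Or.inl h1)
        rw [if_neg h1, if_neg hB, if_pos rfl, closeRow_eq]
        rw [ih false _ (by simp; omega)]

-- ===== VERDICT (by name: the statement is the Claim_ definition above) =====
theorem initIncrement_spec : Claim_equal_initIncrement := by
  intro integers noc soc mfm lbb _ _
  unfold Spec_initIncrement initIncrement initIncrement_alt
  rw [(aRows_eq integers noc soc mfm lbb (integers.length - 1)).1, bRows_eq]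
  simp only [List.headD_cons]
  rw [rows_agree integers noc soc mfm lbb (integers.length - 1) false [1] (by simp; omega)]
  simp
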